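-- pv_equiv track=rewrite | github.com/ahaiceid/adventofcode.com | 2025/day/4/solver.py | generate_heat_map
-- ===== SOURCE A (Python) =====
-- NEIGHBOUR_OFFSETS = [(-1,-1),(0,-1),(1,-1),(1,0),(1,1),(0,1),(-1,1),(-1,0)]
--
-- def is_within_map_bounds(x,y,map):
--     return 0<=min(x,y) and x<len(map[0]) and y<len(map)
--
-- def generate_heat_map(tp_map):
--     heat_map = [[0 for _ in range(len(tp_map[0]))] for _ in range(len(tp_map))]
--     for y in range(len(tp_map)):
--         for x in range(len(tp_map[0])):
--             if tp_map[y][x]=='@':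
--                 for offset in NEIGHBOUR_OFFSETS:
--                     nx, ny = x+offset[0], y+offset[1]
--                     if is_within_map_bounds(nx,ny,tp_map):
--                         heat_map[ny][nx] += 1
--     return heat_map
-- ===== SOURCE B (Python) =====
-- NEIGHBOUR_OFFSETS = [(-1,-1),(0,-1),(1,-1),(1,0),(1,1),(0,1),(-1,1),(-1,0)]
--
-- def is_within_map_bounds(x,y,map):
--     return 0<=min(x,y) and x<len(map[0]) and y<len(map)
--
-- def generate_heat_map(tp_map):
--     # gather: each cell counts its '@' neighbours, instead of each '@' pushing +1 to its neighbours
--     return [[sum(1 for dx, dy in NEIGHBOUR_OFFSETS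
--                  if is_within_map_bounds(x+dx, y+dy, tp_map)
--                  and tp_map[y+dy][x+dx] == '@')
--              for x in range(len(tp_map[0]))]
--             for y in range(len(tp_map))]
-- ===== Notes on version B (the rewrite author's own statement) =====
-- stated objective: alternative
-- what changed: B replaces A's scatter (every '@' cell pushes +1 into a mutable grid at each in-bounds neighbour) by a gather: the result grid is built directly by counting, for each cell, its in-bounds '@' neighbours; no mutable accumulator grid exists.
import Mathlib
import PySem

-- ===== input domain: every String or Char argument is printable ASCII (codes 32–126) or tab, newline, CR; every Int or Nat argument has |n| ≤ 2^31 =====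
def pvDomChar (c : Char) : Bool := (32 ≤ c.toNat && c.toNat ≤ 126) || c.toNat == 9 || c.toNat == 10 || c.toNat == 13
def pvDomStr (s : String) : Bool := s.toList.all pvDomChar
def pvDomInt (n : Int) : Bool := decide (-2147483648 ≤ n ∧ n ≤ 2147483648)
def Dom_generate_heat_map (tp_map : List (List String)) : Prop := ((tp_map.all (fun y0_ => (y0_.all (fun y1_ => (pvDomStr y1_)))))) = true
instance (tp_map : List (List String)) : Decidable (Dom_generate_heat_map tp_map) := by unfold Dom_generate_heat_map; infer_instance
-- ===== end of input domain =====

-- B is a gather (each cell counts its '@' neighbours) instead of A's scatter into a mutable grid; return values agree on Pre_.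

-- ===== PORT A =====
def NEIGHBOUR_OFFSETS : List (Int × Int) := [(-1,-1),(0,-1),(1,-1),(1,0),(1,1),(0,1),(-1,1),(-1,0)]

def is_within_map_bounds (x y : Int) (map : List (List String)) : Bool :=
  decide (0 ≤ min x y) && decide (x < ((map.getD 0 []).length : Int)) && decide (y < (map.length : Int))

-- heat_map[ny][nx] += 1 (guarded in-bounds at every call site)
def ghmBump (heat : List (List Int)) (ny nx : Int) : List (List Int) :=
  PySem.List.pySetD heat ny
    (PySem.List.pySetD (PySem.List.pyGetD heat ny []) nx
      (PySem.List.pyGetD (PySem.List.pyGetD heat ny []) nx 0 + 1))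

def generate_heat_map (tp_map : List (List String)) : List (List Int) :=
  let heat0 := (PySem.List.pyRange 0 tp_map.length 1).map (fun _ =>
      (PySem.List.pyRange 0 (tp_map.getD 0 []).length 1).map (fun _ => (0 : Int)))
  (PySem.List.pyRange 0 tp_map.length 1).foldl (fun heat y =>
    (PySem.List.pyRange 0 (tp_map.getD 0 []).length 1).foldl (fun heat x =>
      if PySem.List.pyGetD (PySem.List.pyGetD tp_map y []) x "" == "@" then
        NEIGHBOUR_OFFSETS.foldl (fun heat o =>
          if is_within_map_bounds (x + o.1) (y + o.2) tp_map then
            ghmBump heat (y + o.2) (x + o.1)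
          else heat) heat
      else heat) heat) heat0

-- ===== PORT B =====
def generate_heat_map_alt (tp_map : List (List String)) : List (List Int) :=
  (PySem.List.pyRange 0 tp_map.length 1).map (fun y =>
    (PySem.List.pyRange 0 (tp_map.getD 0 []).length 1).map (fun x =>
      (NEIGHBOUR_OFFSETS.countP (fun o =>
        is_within_map_bounds (x + o.1) (y + o.2) tp_map &&
        (PySem.List.pyGetD (PySem.List.pyGetD tp_map (y + o.2) []) (x + o.1) "" == "@")) : Int)))

-- ===== PRECONDITION & SPEC =====
-- Pre_ excludes exactly the inputs on which A raises IndexError: a row shorter than row 0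
-- (the 'for x in range(len(tp_map[0]))' loop then indexes past that row's end).
def Pre_generate_heat_map (tp_map : List (List String)) : Prop :=
  ∀ row ∈ tp_map, (tp_map.getD 0 []).length ≤ row.length
instance (tp_map : List (List String)) : Decidable (Pre_generate_heat_map tp_map) := by
  unfold Pre_generate_heat_map; infer_instance

def pvWitness_generate_heat_map : List (List String) := [["@", "."], [".", "@"]]

def Spec_generate_heat_map (tp_map : List (List String)) (out : List (List Int)) : Prop := out = generate_heat_map_alt tp_map
instance (tp_map : List (List String)) (out : List (List Int)) : Decidable (Spec_generate_heat_map tp_map out) := by unfold Spec_generate_heat_map; infer_instance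

-- ===== CLAIM (what is proved, stated in full; the proofs are below) =====
def Claim_equal_generate_heat_map : Prop := ∀ (tp_map : List (List String)), Dom_generate_heat_map tp_map → Pre_generate_heat_map tp_map → Spec_generate_heat_map tp_map (generate_heat_map tp_map)

-- ===== LEMMAS AND PROOFS =====

-- ===== helper defs for the proof =====
def ghmGet2 (g : List (List Int)) (j i : Nat) : Int := (g.getD j []).getD i 0

def ghmShape (tp : List (List String)) (g : List (List Int)) : Prop :=
  g.length = tp.length ∧ ∀ k, k < tp.length → (g.getD k []).length = (tp.getD 0 []).length

lemma ghm_getD_set {α : Type} (l : List α) (n : Nat) (v : α) (j : Nat) (d : α) :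
    (l.set n v).getD j d = if n = j ∧ n < l.length then v else l.getD j d := by
  simp only [List.getD_eq_getElem?_getD, List.getElem?_set]
  by_cases h1 : n = j
  · subst h1
    by_cases h2 : n < l.length
    · simp [h2]
    · simp [h2]
  · simp [h1]

lemma ghmBump_get2 (heat : List (List Int)) (ny nx : Int) (hy0 : 0 ≤ ny) (hx0 : 0 ≤ nx)
    (hy : ny.toNat < heat.length) (hx : nx.toNat < (heat.getD ny.toNat []).length) (j i : Nat) :
    ghmGet2 (ghmBump heat ny nx) j i
      = ghmGet2 heat j i + (if ny = (j : Int) ∧ nx = (i : Int) then 1 else 0) := by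
  have hrow : heat.getD ny.toNat [] = heat[ny.toNat] := List.getD_eq_getElem _ _ hy
  rw [hrow] at hx
  unfold ghmBump ghmGet2
  rw [PySem.List.pySetD_of_nonneg _ _ hy0, PySem.List.pySetD_of_nonneg _ _ hx0,
      PySem.List.pyGetD_eq_getElem _ _ hy0 (by omega),
      PySem.List.pyGetD_eq_getElem _ _ hx0 (by omega)]
  rw [ghm_getD_set]
  by_cases hj : ny.toNat = j
  · rw [if_pos ⟨hj, hy⟩]
    subst hj
    rw [ghm_getD_set]
    by_cases hi2 : nx.toNat = i
    · subst hi2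
      rw [if_pos ⟨rfl, hx⟩, if_pos ⟨by omega, by omega⟩, hrow, List.getD_eq_getElem _ _ hx]
    · rw [if_neg (by omega), if_neg (by omega), hrow]; ring
  · rw [if_neg (by omega), if_neg (by omega)]; ring

lemma ghmBump_shape (tp : List (List String)) (heat : List (List Int)) (ny nx : Int)
    (hs : ghmShape tp heat) (hy0 : 0 ≤ ny) (hx0 : 0 ≤ nx) (hy : ny < (tp.length : Int)) :
    ghmShape tp (ghmBump heat ny nx) := by
  obtain ⟨hl, hr⟩ := hs
  unfold ghmBump
  rw [PySem.List.pySetD_of_nonneg _ _ hy0]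
  refine ⟨by simpa using hl, ?_⟩
  intro k hk
  rw [ghm_getD_set]
  by_cases h : ny.toNat = k ∧ ny.toNat < heat.length
  · rw [if_pos h]
    rw [PySem.List.pySetD_of_nonneg]
    · rw [List.length_set]
      rw [PySem.List.pyGetD_eq_getElem _ _ hy0 (by omega), ← List.getD_eq_getElem _ _ (by omega : ny.toNat < heat.length)]
      rw [h.1]; exact hr k hk
    · exact hx0
  · rw [if_neg h]; exact hr k hk

lemma ghm_bounds_iff (x y : Int) (tp : List (List String)) :
    is_within_map_bounds x y tp = true ↔
      0 ≤ x ∧ 0 ≤ y ∧ x < ((tp.getD 0 []).length : Int) ∧ y < (tp.length : Int) := by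
  simp [is_within_map_bounds]
  tauto

lemma ghm_fold_off (tp : List (List String)) (y x : Int) (os : List (Int × Int))
    (heat : List (List Int)) (hs : ghmShape tp heat) :
    ghmShape tp (os.foldl (fun heat o =>
        if is_within_map_bounds (x + o.1) (y + o.2) tp then ghmBump heat (y + o.2) (x + o.1) else heat) heat)
    ∧ ∀ j i : Nat, j < tp.length → i < (tp.getD 0 []).length →
      ghmGet2 (os.foldl (fun heat o =>
          if is_within_map_bounds (x + o.1) (y + o.2) tp then ghmBump heat (y + o.2) (x + o.1) else heat) heat) j i
        = ghmGet2 heat j i +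
          (os.countP (fun o => is_within_map_bounds (x + o.1) (y + o.2) tp
              && ((y + o.2) == (j : Int)) && ((x + o.1) == (i : Int))) : Int) := by
  induction os generalizing heat with
  | nil => exact ⟨hs, by simp⟩
  | cons o os ih =>
    simp only [List.foldl_cons, List.countP_cons]
    by_cases hg : is_within_map_bounds (x + o.1) (y + o.2) tp = true
    · obtain ⟨hx0, hy0, hxW, hyH⟩ := (ghm_bounds_iff _ _ _).mp hg
      have hs' : ghmShape tp (ghmBump heat (y + o.2) (x + o.1)) :=
        ghmBump_shape tp heat _ _ hs hy0 hx0 hyH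
      obtain ⟨hsl, hsr⟩ := hs
      obtain ⟨ihs, ihe⟩ := ih (ghmBump heat (y + o.2) (x + o.1)) hs'
      rw [if_pos hg]
      refine ⟨ihs, ?_⟩
      intro j i hj hi
      rw [ihe j i hj hi,
          ghmBump_get2 heat _ _ hy0 hx0 (by omega) (by rw [hsr (y + o.2).toNat (by omega)]; omega)]
      by_cases he : (y + o.2) = (j : Int) ∧ (x + o.1) = (i : Int)
      · have hg' : is_within_map_bounds ((i : Int)) ((j : Int)) tp = true := by
          rw [← he.1, ← he.2]; exact hg
        have : (is_within_map_bounds (x + o.1) (y + o.2) tp && ((y + o.2) == (j : Int)) && ((x + o.1) == (i : Int))) = true := by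
          simp [he.1, he.2, hg']
        rw [if_pos he, this]
        norm_num
        ring
      · have : (is_within_map_bounds (x + o.1) (y + o.2) tp && ((y + o.2) == (j : Int)) && ((x + o.1) == (i : Int))) = false := by
          rcases not_and_or.mp he with h | h <;> simp [h, hg]
        rw [if_neg he, this]
        norm_num
    · have hgf : is_within_map_bounds (x + o.1) (y + o.2) tp = false := by
        simpa using hg
      rw [if_neg hg]
      obtain ⟨ihs, ihe⟩ := ih heat hs
      refine ⟨ihs, ?_⟩
      intro j i hj hi
      rw [ihe j i hj hi, hgf]
      simp

def ghmCellCnt (tp : List (List String)) (j i : Nat) (y x : Int) : Int :=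
  if PySem.List.pyGetD (PySem.List.pyGetD tp y []) x "" == "@" then
    (NEIGHBOUR_OFFSETS.countP (fun o => is_within_map_bounds (x + o.1) (y + o.2) tp
        && ((y + o.2) == (j : Int)) && ((x + o.1) == (i : Int))) : Int)
  else 0

lemma ghm_fold_x (tp : List (List String)) (y : Int) (xs : List Int)
    (heat : List (List Int)) (hs : ghmShape tp heat) :
    ghmShape tp (xs.foldl (fun heat x =>
        if PySem.List.pyGetD (PySem.List.pyGetD tp y []) x "" == "@" then
          NEIGHBOUR_OFFSETS.foldl (fun heat o =>
            if is_within_map_bounds (x + o.1) (y + o.2) tp then ghmBump heat (y + o.2) (x + o.1) else heat) heat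
        else heat) heat)
    ∧ ∀ j i : Nat, j < tp.length → i < (tp.getD 0 []).length →
      ghmGet2 (xs.foldl (fun heat x =>
          if PySem.List.pyGetD (PySem.List.pyGetD tp y []) x "" == "@" then
            NEIGHBOUR_OFFSETS.foldl (fun heat o =>
              if is_within_map_bounds (x + o.1) (y + o.2) tp then ghmBump heat (y + o.2) (x + o.1) else heat) heat
          else heat) heat) j i
        = ghmGet2 heat j i + (xs.map (ghmCellCnt tp j i y)).sum := by
  induction xs generalizing heat with
  | nil => exact ⟨hs, by simp⟩
  | cons x xs ih =>
    simp only [List.foldl_cons, List.map_cons, List.sum_cons]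
    by_cases hat : (PySem.List.pyGetD (PySem.List.pyGetD tp y []) x "" == "@") = true
    · rw [if_pos hat]
      obtain ⟨hs1, he1⟩ := ghm_fold_off tp y x NEIGHBOUR_OFFSETS heat hs
      obtain ⟨ihs, ihe⟩ := ih _ hs1
      refine ⟨ihs, ?_⟩
      intro j i hj hi
      rw [ihe j i hj hi, he1 j i hj hi]
      have : ghmCellCnt tp j i y x
          = (NEIGHBOUR_OFFSETS.countP (fun o => is_within_map_bounds (x + o.1) (y + o.2) tp
              && ((y + o.2) == (j : Int)) && ((x + o.1) == (i : Int))) : Int) := by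
        unfold ghmCellCnt; rw [if_pos hat]
      rw [this]; ring
    · rw [if_neg hat]
      obtain ⟨ihs, ihe⟩ := ih heat hs
      refine ⟨ihs, ?_⟩
      intro j i hj hi
      rw [ihe j i hj hi]
      have : ghmCellCnt tp j i y x = 0 := by
        unfold ghmCellCnt; rw [if_neg hat]
      rw [this]; ring

lemma ghm_fold_y (tp : List (List String)) (ys : List Int)
    (heat : List (List Int)) (hs : ghmShape tp heat) :
    ghmShape tp (ys.foldl (fun heat y =>
        (PySem.List.pyRange 0 (tp.getD 0 []).length 1).foldl (fun heat x =>
          if PySem.List.pyGetD (PySem.List.pyGetD tp y []) x "" == "@" then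
            NEIGHBOUR_OFFSETS.foldl (fun heat o =>
              if is_within_map_bounds (x + o.1) (y + o.2) tp then ghmBump heat (y + o.2) (x + o.1) else heat) heat
          else heat) heat) heat)
    ∧ ∀ j i : Nat, j < tp.length → i < (tp.getD 0 []).length →
      ghmGet2 (ys.foldl (fun heat y =>
          (PySem.List.pyRange 0 (tp.getD 0 []).length 1).foldl (fun heat x =>
            if PySem.List.pyGetD (PySem.List.pyGetD tp y []) x "" == "@" then
              NEIGHBOUR_OFFSETS.foldl (fun heat o =>
                if is_within_map_bounds (x + o.1) (y + o.2) tp then ghmBump heat (y + o.2) (x + o.1) else heat) heat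
            else heat) heat) heat) j i
        = ghmGet2 heat j i +
          (ys.map (fun y => ((PySem.List.pyRange 0 (tp.getD 0 []).length 1).map (ghmCellCnt tp j i y)).sum)).sum := by
  induction ys generalizing heat with
  | nil => exact ⟨hs, by simp⟩
  | cons y ys ih =>
    simp only [List.foldl_cons, List.map_cons, List.sum_cons]
    obtain ⟨hs1, he1⟩ := ghm_fold_x tp y (PySem.List.pyRange 0 (tp.getD 0 []).length 1) heat hs
    obtain ⟨ihs, ihe⟩ := ih _ hs1
    refine ⟨ihs, ?_⟩
    intro j i hj hi
    rw [ihe j i hj hi, he1 j i hj hi]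
    ring

lemma ghm_heat0_shape (tp : List (List String)) :
    ghmShape tp ((PySem.List.pyRange 0 tp.length 1).map (fun _ =>
      (PySem.List.pyRange 0 (tp.getD 0 []).length 1).map (fun _ => (0 : Int)))) := by
  constructor
  · simp [PySem.List.length_pyRange_one]
  · intro k hk
    rw [List.getD_eq_getElem _ _ (by simp [PySem.List.length_pyRange_one]; omega), List.getElem_map]
    simp [PySem.List.length_pyRange_one]

lemma ghm_heat0_get2 (tp : List (List String)) (j i : Nat) :
    ghmGet2 ((PySem.List.pyRange 0 tp.length 1).map (fun _ =>
      (PySem.List.pyRange 0 (tp.getD 0 []).length 1).map (fun _ => (0 : Int)))) j i = 0 := by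
  unfold ghmGet2
  have hz : ∀ (r : List Int), (∀ v ∈ r, v = 0) → r.getD i 0 = 0 := by
    intro r h
    rw [List.getD_eq_getElem?_getD]
    cases hg : r[i]? with
    | none => rfl
    | some v => exact h v (List.mem_of_getElem? hg)
  apply hz
  intro v hv
  have : ∀ r ∈ (PySem.List.pyRange 0 (tp.length : Int) 1).map (fun _ =>
      (PySem.List.pyRange 0 ((tp.getD 0 []).length : Int) 1).map (fun _ => (0 : Int))), ∀ v ∈ r, v = 0 := by
    intro r hr
    obtain ⟨_, _, rfl⟩ := List.mem_map.mp hr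
    intro v hv
    obtain ⟨_, _, rfl⟩ := List.mem_map.mp hv
    rfl
  by_cases hj : j < ((PySem.List.pyRange 0 (tp.length : Int) 1).map (fun _ =>
      (PySem.List.pyRange 0 ((tp.getD 0 []).length : Int) 1).map (fun _ => (0 : Int)))).length
  · refine this _ ?_ v hv
    rw [List.getD_eq_getElem _ _ hj]
    exact List.getElem_mem hj
  · rw [List.getD_eq_default _ _ (by omega)] at hv
    simp at hv

lemma ghm_A_shape (tp : List (List String)) : ghmShape tp (generate_heat_map tp) := by
  unfold generate_heat_map
  exact (ghm_fold_y tp _ _ (ghm_heat0_shape tp)).1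

lemma ghm_A_get2 (tp : List (List String)) (j i : Nat)
    (hj : j < tp.length) (hi : i < (tp.getD 0 []).length) :
    ghmGet2 (generate_heat_map tp) j i
      = ((PySem.List.pyRange 0 tp.length 1).map (fun y =>
          ((PySem.List.pyRange 0 (tp.getD 0 []).length 1).map (ghmCellCnt tp j i y)).sum)).sum := by
  unfold generate_heat_map
  rw [(ghm_fold_y tp _ _ (ghm_heat0_shape tp)).2 j i hj hi, ghm_heat0_get2]
  ring

lemma ghm_sum_swap {α β : Type} (l1 : List α) (l2 : List β) (f : α → β → Int) :
    (l1.map (fun a => (l2.map (f a)).sum)).sum = (l2.map (fun b => (l1.map (fun a => f a b)).sum)).sum := by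
  induction l1 with
  | nil => simp
  | cons a t ih => simp [ih, ← List.sum_map_add]

lemma ghm_sum_point_aux (hi : Int) (f : Int → Int) (n : Nat) :
    ∀ lo a : Int, (hi - lo).toNat = n →
      ((PySem.List.pyRange lo hi 1).map (fun t => if t = a then f t else 0)).sum
        = if lo ≤ a ∧ a < hi then f a else 0 := by
  induction n with
  | zero =>
    intro lo a h
    rw [PySem.List.pyRange_one_eq_nil (by omega), if_neg (by omega)]
    simp
  | succ n ih =>
    intro lo a h
    rw [PySem.List.pyRange_one_cons (by omega)]
    simp only [List.map_cons, List.sum_cons]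
    rw [ih (lo + 1) a (by omega)]
    by_cases ha : lo = a
    · subst ha
      rw [if_pos rfl, if_neg (by omega), if_pos (by omega)]
      ring
    · rw [if_neg ha]
      have hc : (lo + 1 ≤ a ∧ a < hi) ↔ (lo ≤ a ∧ a < hi) := by omega
      rw [if_congr hc rfl rfl]
      ring

lemma ghm_sum_point (lo hi a : Int) (f : Int → Int) :
    ((PySem.List.pyRange lo hi 1).map (fun t => if t = a then f t else 0)).sum
      = if lo ≤ a ∧ a < hi then f a else 0 :=
  ghm_sum_point_aux hi f (hi - lo).toNat lo a rfl

lemma ghm_countP_neg (g : Int × Int → Bool) :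
    NEIGHBOUR_OFFSETS.countP (fun o => g (-o.1, -o.2)) = NEIGHBOUR_OFFSETS.countP g := by
  have hperm : (NEIGHBOUR_OFFSETS.map (fun o : Int × Int => (-o.1, -o.2))).Perm NEIGHBOUR_OFFSETS := by
    decide
  rw [← hperm.countP_eq g, List.countP_map]
  rfl

def ghmP (tp : List (List String)) (j i : Nat) (y x : Int) (o : Int × Int) : Bool :=
  (PySem.List.pyGetD (PySem.List.pyGetD tp y []) x "" == "@")
  && (is_within_map_bounds (x + o.1) (y + o.2) tp && ((y + o.2) == (j : Int)) && ((x + o.1) == (i : Int)))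

lemma ghm_offset_sum (tp : List (List String)) (j i : Nat)
    (hj : j < tp.length) (hi : i < (tp.getD 0 []).length) (o : Int × Int) :
    ((PySem.List.pyRange 0 tp.length 1).map (fun y =>
        ((PySem.List.pyRange 0 (tp.getD 0 []).length 1).map (fun x =>
          if ghmP tp j i y x o then (1 : Int) else 0)).sum)).sum
      = if (is_within_map_bounds ((i : Int) + -o.1) ((j : Int) + -o.2) tp
            && (PySem.List.pyGetD (PySem.List.pyGetD tp ((j : Int) + -o.2) []) ((i : Int) + -o.1) "" == "@"))
        then (1 : Int) else 0 := by
  have hyz : ∀ y : Int, y ≠ (j : Int) + -o.2 →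
      ((PySem.List.pyRange 0 (tp.getD 0 []).length 1).map (fun x =>
        if ghmP tp j i y x o then (1 : Int) else 0)).sum = 0 := by
    intro y hy
    apply List.sum_eq_zero
    intro v hv
    obtain ⟨x, -, rfl⟩ := List.mem_map.mp hv
    have hb : ((y + o.2) == (j : Int)) = false := by
      simp only [beq_eq_false_iff_ne, ne_eq]
      omega
    simp [ghmP, hb]
  have hmapy : (PySem.List.pyRange 0 tp.length 1).map (fun y =>
        ((PySem.List.pyRange 0 (tp.getD 0 []).length 1).map (fun x =>
          if ghmP tp j i y x o then (1 : Int) else 0)).sum)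
      = (PySem.List.pyRange 0 tp.length 1).map (fun y =>
        if y = (j : Int) + -o.2 then
          ((PySem.List.pyRange 0 (tp.getD 0 []).length 1).map (fun x =>
            if ghmP tp j i y x o then (1 : Int) else 0)).sum
        else 0) := by
    apply List.map_congr_left
    intro y _
    by_cases h : y = (j : Int) + -o.2
    · rw [if_pos h]
    · rw [if_neg h]
      exact hyz y h
  rw [hmapy, ghm_sum_point 0 tp.length ((j : Int) + -o.2) _]
  by_cases hA : 0 ≤ (j : Int) + -o.2 ∧ (j : Int) + -o.2 < (tp.length : Int)
  · rw [if_pos hA]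
    have hxz : ∀ x : Int, x ≠ (i : Int) + -o.1 →
        (if ghmP tp j i ((j : Int) + -o.2) x o then (1 : Int) else 0) = 0 := by
      intro x hx
      have hb : ((x + o.1) == (i : Int)) = false := by
        simp only [beq_eq_false_iff_ne, ne_eq]
        omega
      simp [ghmP, hb]
    have hmapx : (PySem.List.pyRange 0 (tp.getD 0 []).length 1).map (fun x =>
          if ghmP tp j i ((j : Int) + -o.2) x o then (1 : Int) else 0)
        = (PySem.List.pyRange 0 (tp.getD 0 []).length 1).map (fun x =>
          if x = (i : Int) + -o.1 then
            (if ghmP tp j i ((j : Int) + -o.2) x o then (1 : Int) else 0)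
          else 0) := by
      apply List.map_congr_left
      intro x _
      by_cases h : x = (i : Int) + -o.1
      · rw [if_pos h]
      · rw [if_neg h]
        exact hxz x h
    rw [hmapx, ghm_sum_point 0 (tp.getD 0 []).length ((i : Int) + -o.1) _]
    by_cases hB : 0 ≤ (i : Int) + -o.1 ∧ (i : Int) + -o.1 < ((tp.getD 0 []).length : Int)
    · rw [if_pos hB]
      have h1 : (((j : Int) + -o.2 + o.2) == (j : Int)) = true := by
        simp only [beq_iff_eq]
        omega
      have h2 : (((i : Int) + -o.1 + o.1) == (i : Int)) = true := by
        simp only [beq_iff_eq]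
        omega
      have h3 : is_within_map_bounds ((i : Int) + -o.1 + o.1) ((j : Int) + -o.2 + o.2) tp = true := by
        rw [ghm_bounds_iff]
        omega
      have h4 : is_within_map_bounds ((i : Int) + -o.1) ((j : Int) + -o.2) tp = true := by
        rw [ghm_bounds_iff]
        omega
      simp only [ghmP, h1, h2, h3, h4, Bool.and_true, Bool.true_and]
    · rw [if_neg hB]
      have h5 : ¬ ((is_within_map_bounds ((i : Int) + -o.1) ((j : Int) + -o.2) tp
            && (PySem.List.pyGetD (PySem.List.pyGetD tp ((j : Int) + -o.2) []) ((i : Int) + -o.1) "" == "@")) = true) := by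
        simp only [Bool.and_eq_true, ghm_bounds_iff]
        omega
      rw [if_neg h5]
  · rw [if_neg hA]
    have h5 : ¬ ((is_within_map_bounds ((i : Int) + -o.1) ((j : Int) + -o.2) tp
          && (PySem.List.pyGetD (PySem.List.pyGetD tp ((j : Int) + -o.2) []) ((i : Int) + -o.1) "" == "@")) = true) := by
      simp only [Bool.and_eq_true, ghm_bounds_iff]
      omega
    rw [if_neg h5]

lemma ghm_core (tp : List (List String)) (j i : Nat)
    (hj : j < tp.length) (hi : i < (tp.getD 0 []).length) :
    ((PySem.List.pyRange 0 tp.length 1).map (fun y =>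
        ((PySem.List.pyRange 0 (tp.getD 0 []).length 1).map (ghmCellCnt tp j i y)).sum)).sum
      = (NEIGHBOUR_OFFSETS.countP (fun o =>
          is_within_map_bounds ((i : Int) + o.1) ((j : Int) + o.2) tp
          && (PySem.List.pyGetD (PySem.List.pyGetD tp ((j : Int) + o.2) []) ((i : Int) + o.1) "" == "@")) : Int) := by
  have h1 : ∀ y x, ghmCellCnt tp j i y x
      = (NEIGHBOUR_OFFSETS.map (fun o => if ghmP tp j i y x o then (1 : Int) else 0)).sum := by
    intro y x
    rw [PySem.List.sum_map_ite_one_zero]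
    unfold ghmCellCnt
    by_cases hat : (PySem.List.pyGetD (PySem.List.pyGetD tp y []) x "" == "@") = true
    · rw [if_pos hat]
      congr 2
      funext o
      simp [ghmP, hat]
    · rw [if_neg hat]
      simp only [Bool.not_eq_true] at hat
      have hz : List.countP (ghmP tp j i y x) NEIGHBOUR_OFFSETS = 0 :=
        List.countP_eq_zero.mpr (fun o _ => by simp [ghmP, hat])
      rw [hz]
      rfl
  calc ((PySem.List.pyRange 0 tp.length 1).map (fun y =>
        ((PySem.List.pyRange 0 (tp.getD 0 []).length 1).map (ghmCellCnt tp j i y)).sum)).sum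
      = ((PySem.List.pyRange 0 tp.length 1).map (fun y =>
        ((NEIGHBOUR_OFFSETS.map (fun o =>
          ((PySem.List.pyRange 0 (tp.getD 0 []).length 1).map (fun x => if ghmP tp j i y x o then (1:Int) else 0)).sum)).sum))).sum := by
        apply congrArg
        apply List.map_congr_left
        intro y _
        rw [show (PySem.List.pyRange 0 (tp.getD 0 []).length 1).map (ghmCellCnt tp j i y)
              = (PySem.List.pyRange 0 (tp.getD 0 []).length 1).map (fun x =>
                  (NEIGHBOUR_OFFSETS.map (fun o => if ghmP tp j i y x o then (1:Int) else 0)).sum) from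
            List.map_congr_left (fun x _ => h1 y x)]
        exact ghm_sum_swap _ _ _
    _ = (NEIGHBOUR_OFFSETS.map (fun o =>
          ((PySem.List.pyRange 0 tp.length 1).map (fun y =>
            ((PySem.List.pyRange 0 (tp.getD 0 []).length 1).map (fun x => if ghmP tp j i y x o then (1:Int) else 0)).sum)).sum)).sum :=
        ghm_sum_swap _ _ _
    _ = (NEIGHBOUR_OFFSETS.map (fun o => if ((fun o : Int × Int =>
            is_within_map_bounds ((i : Int) + o.1) ((j : Int) + o.2) tp
            && (PySem.List.pyGetD (PySem.List.pyGetD tp ((j : Int) + o.2) []) ((i : Int) + o.1) "" == "@"))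
            (-o.1, -o.2)) then (1:Int) else 0)).sum := by
        apply congrArg
        apply List.map_congr_left
        intro o _
        exact ghm_offset_sum tp j i hj hi o
    _ = (NEIGHBOUR_OFFSETS.countP (fun o =>
          is_within_map_bounds ((i : Int) + o.1) ((j : Int) + o.2) tp
          && (PySem.List.pyGetD (PySem.List.pyGetD tp ((j : Int) + o.2) []) ((i : Int) + o.1) "" == "@")) : Int) := by
        rw [PySem.List.sum_map_ite_one_zero]
        exact_mod_cast ghm_countP_neg (fun o =>
          is_within_map_bounds ((i : Int) + o.1) ((j : Int) + o.2) tp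
          && (PySem.List.pyGetD (PySem.List.pyGetD tp ((j : Int) + o.2) []) ((i : Int) + o.1) "" == "@"))

-- ===== VERDICT (by name: the statement is the Claim_ definition above) =====
theorem generate_heat_map_spec : Claim_equal_generate_heat_map := by
  unfold Claim_equal_generate_heat_map Spec_generate_heat_map
  intro tp _dom _pre
  obtain ⟨hsl, hsr⟩ := ghm_A_shape tp
  have hBlen : (generate_heat_map_alt tp).length = tp.length := by
    unfold generate_heat_map_alt
    simp [PySem.List.length_pyRange_one]
  apply List.ext_getElem (by omega)
  intro j h1 h2
  have hj : j < tp.length := by omega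
  have hrowA : (generate_heat_map tp)[j] = (generate_heat_map tp).getD j [] :=
    (List.getD_eq_getElem _ _ h1).symm
  have hrowAlen : (generate_heat_map tp)[j].length = (tp.getD 0 []).length := by
    rw [hrowA]
    exact hsr j hj
  unfold generate_heat_map_alt
  rw [List.getElem_map, PySem.List.getElem_pyRange_one]
  apply List.ext_getElem
  · rw [hrowAlen]
    simp [PySem.List.length_pyRange_one]
  intro i hi1 hi2
  have hi : i < (tp.getD 0 []).length := by
    rw [hrowAlen] at hi1
    exact hi1
  rw [List.getElem_map, PySem.List.getElem_pyRange_one]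
  have hentry : (generate_heat_map tp)[j][i] = ghmGet2 (generate_heat_map tp) j i := by
    unfold ghmGet2
    rw [← hrowA, List.getD_eq_getElem _ _ hi1]
  rw [hentry, ghm_A_get2 tp j i hj hi, ghm_core tp j i hj hi]
  norm_num
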